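-- pv_equiv track=rewrite | github.com/leetaewoo123/algorithm | 프로그래머스/lv0/120871. 저주의 숫자 3/저주의 숫자 3.py | solution
-- ===== SOURCE A (Python) =====
-- def solution(n):
--     answer,k = 0,0
--     a = []
--
--     while k < n:
--         if (answer%3 != 0) and ("3" not in str(answer)):
--             k+= 1
--             a.append(answer)
--             answer += 1
--         else :
--             answer +=1
--     return a[-1]
-- ===== SOURCE B (Python) =====
-- def _count3(x):
--     if x <= 0:
--         return (0, 0, 0, False)
--     q, r = x // 10, x % 10
--     c0, c1, c2, h = _count3(q)
--     s = 3 * (c0 + c1 + c2)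
--     c0, c1, c2 = s, s, s
--     if not h:
--         for b in range(r):
--             if b != 3:
--                 t = (q + b) % 3
--                 if t == 0:
--                     c0 += 1
--                 elif t == 1:
--                     c1 += 1
--                 else:
--                     c2 += 1
--     return (c0, c1, c2, h or r == 3)
--
-- def _count(x):
--     c0, c1, c2, h = _count3(x + 1)
--     return c1 + c2
--
-- def solution(n):
--     hi = 10
--     while _count(hi) < n:
--         hi *= 10
--     lo = 1
--     while lo < hi:
--         mid = (lo + hi) // 2
--         if _count(mid) < n:
--             lo = mid + 1
--         else:
--             hi = mid
--     return lo
-- ===== Notes on version B (the rewrite author's own statement) =====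
-- stated objective: faster
-- what changed: Replaced the linear scan over all integers (string test per candidate) with a low-digit-recursion count of valid numbers up to a bound by residue class, plus binary search on the answer value.
import Mathlib
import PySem

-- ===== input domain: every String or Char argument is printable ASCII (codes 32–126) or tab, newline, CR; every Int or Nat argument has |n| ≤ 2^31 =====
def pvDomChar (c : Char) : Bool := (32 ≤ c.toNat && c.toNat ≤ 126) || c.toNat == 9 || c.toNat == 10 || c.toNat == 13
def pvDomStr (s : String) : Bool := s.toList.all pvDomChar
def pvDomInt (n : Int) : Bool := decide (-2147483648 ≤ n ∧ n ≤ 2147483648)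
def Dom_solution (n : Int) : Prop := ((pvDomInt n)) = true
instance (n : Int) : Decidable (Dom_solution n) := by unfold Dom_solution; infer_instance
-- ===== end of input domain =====

-- B replaces A's linear scan over all integers by a digit-recursion count of valid
-- numbers (by residue mod 3) plus binary search on the answer value (objective: faster).


-- ===== PORT A =====
-- A's loop test "(answer%3 != 0) and ('3' not in str(answer))"
def solGoodb (a : Int) : Bool :=
  decide (PySem.Int.mod a 3 ≠ 0) && !(PySem.Str.isIn "3" (PySem.Int.toStr a))

-- A's while loop, with a fuel argument that only makes the recursion total
-- (the proofs below show the fuel passed by `solution` is never exhausted on Pre_).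
def solLoopA (fuel : ℕ) (n answer k : Int) (a : List Int) : List Int :=
  match fuel with
  | 0 => a
  | fuel + 1 =>
    if k < n then
      if solGoodb answer then solLoopA fuel n (answer + 1) (k + 1) (a ++ [answer])
      else solLoopA fuel n (answer + 1) k a
    else a

def solution (n : Int) : Int :=
  -- a[-1]: Python raises IndexError when the list is empty (n ≤ 0); excluded by Pre_solution
  (PySem.List.pyGet? (solLoopA (10 ^ n.toNat + 2) n 0 0 []) (-1)).getD 0

-- termination facts for B's recursions (cited by name in decreasing_by)
theorem pvCnt3Dec (x : Int) (h : ¬ x ≤ 0) :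
    (PySem.Int.floordiv x 10).toNat < x.toNat := by
  have hx : 0 < x := not_le.mp h
  rw [Int.toNat_lt_toNat hx]
  apply (PySem.Int.floordiv_lt_iff_lt_mul (by decide : (0:ℤ) < 10)).2
  have h2 := mul_lt_mul_of_pos_left (show (1:ℤ) < 10 by decide) hx
  rw [mul_one] at h2
  exact h2

theorem pvBSDec1 (lo hi : Int) (h : lo < hi) :
    (hi - (PySem.Int.floordiv (lo + hi) 2 + 1)).toNat < (hi - lo).toNat := by
  have hb := (PySem.Int.floordiv_two_mid_bounds (le_of_lt h)).1
  have hpos : 0 < hi - lo := Int.sub_pos.mpr h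
  rw [Int.toNat_lt_toNat hpos]
  exact sub_lt_sub_left (lt_of_le_of_lt hb (lt_add_one _)) hi

theorem pvBSDec2 (lo hi : Int) (h : lo < hi) :
    (PySem.Int.floordiv (lo + hi) 2 - lo).toNat < (hi - lo).toNat := by
  have hpos : 0 < hi - lo := Int.sub_pos.mpr h
  have hmlt : PySem.Int.floordiv (lo + hi) 2 < hi := by
    apply (PySem.Int.floordiv_lt_iff_lt_mul (by decide : (0:ℤ) < 2)).2
    rw [mul_two]
    exact add_lt_add_of_lt_of_le h (le_refl hi)
  rw [Int.toNat_lt_toNat hpos]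
  exact sub_lt_sub_right hmlt lo

-- ===== PORT B =====
-- Source B's _count3: counts of digit-3-free numbers in [0, x) split by value mod 3,
-- plus the "x contains digit 3" flag, by recursion on the low decimal digit.
def pvCnt3 (x : Int) : Int × Int × Int × Bool :=
  if x ≤ 0 then (0, 0, 0, false)
  else
    let q := PySem.Int.floordiv x 10
    let r := PySem.Int.mod x 10
    let p := pvCnt3 q
    let s := 3 * (p.1 + p.2.1 + p.2.2.1)
    let d :=
      if !p.2.2.2 then
        (PySem.List.pyRange 0 r).foldl (fun (c : Int × Int × Int) b =>
          if b ≠ 3 then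
            let t := PySem.Int.mod (q + b) 3
            if t = 0 then (c.1 + 1, c.2.1, c.2.2)
            else if t = 1 then (c.1, c.2.1 + 1, c.2.2)
            else (c.1, c.2.1, c.2.2 + 1)
          else c) (s, s, s)
      else (s, s, s)
    (d.1, d.2.1, d.2.2, p.2.2.2 || decide (r = 3))
termination_by x.toNat
decreasing_by exact pvCnt3Dec x (by assumption)

-- Source B's _count: numbers in [1, x] that are not divisible by 3 and have no digit 3
def pvICount (x : Int) : Int :=
  let p := pvCnt3 (x + 1)
  p.2.1 + p.2.2.1

-- Source B's first loop (hi *= 10 until _count(hi) >= n); fuel only makes it total,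
-- the proofs show the fuel passed by solution_alt is never exhausted on Pre_.
def pvGrowHi (fuel : ℕ) (n hi : Int) : Int :=
  match fuel with
  | 0 => hi
  | fuel + 1 => if pvICount hi < n then pvGrowHi fuel n (10 * hi) else hi

-- Source B's binary search loop
def pvBinSearch (n lo hi : Int) : Int :=
  if h : lo < hi then
    let mid := PySem.Int.floordiv (lo + hi) 2
    if pvICount mid < n then pvBinSearch n (mid + 1) hi else pvBinSearch n lo mid
  else lo
termination_by (hi - lo).toNat
decreasing_by
  · exact pvBSDec1 lo hi h
  · exact pvBSDec2 lo hi h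

def solution_alt (n : Int) : Int :=
  pvBinSearch n 1 (pvGrowHi (n.toNat + 2) n 10)

-- ===== PRECONDITION & SPEC =====
-- Pre_ excludes exactly n ≤ 0, where A's a[-1] raises IndexError on the empty list.
def Pre_solution (n : Int) : Prop := 1 ≤ n
instance (n : Int) : Decidable (Pre_solution n) := by unfold Pre_solution; infer_instance
def pvWitness_solution : Int := 5

def Spec_solution (n : Int) (out : Int) : Prop := out = solution_alt n
instance (n : Int) (out : Int) : Decidable (Spec_solution n out) := by unfold Spec_solution; infer_instance

-- ===== CLAIM (what is proved, stated in full; the proofs are below) =====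
def Claim_equal_solution : Prop := ∀ (n : Int), Dom_solution n → Pre_solution n → Spec_solution n (solution n)

-- ===== LEMMAS AND PROOFS =====

-- decimal digits of a natural number, most significant first (mirrors Nat.toDigitsCore)
def pvDigs (n : ℕ) : List Char :=
  if h : n / 10 = 0 then [Nat.digitChar (n % 10)]
  else pvDigs (n / 10) ++ [Nat.digitChar (n % 10)]
termination_by n
decreasing_by omega

-- "n has a decimal digit 3"
def pvHas3 (n : ℕ) : Bool :=
  if h : n = 0 then false else (decide (n % 10 = 3) || pvHas3 (n / 10))
termination_by n
decreasing_by omega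

-- good numbers: not divisible by 3, no digit 3 (as a Bool, for decidability)
def pvGoodN (m : ℕ) : Bool := !pvHas3 m && decide (m % 3 ≠ 0)

-- 3-free numbers with residue t
def pvResb (t : ℕ) (j : ℕ) : Bool := !pvHas3 j && decide (j % 3 = t)

def pvNC (t m : ℕ) : ℕ := Nat.count (fun j => pvResb t j = true) m
def pvTF (m : ℕ) : ℕ := Nat.count (fun j => (!pvHas3 j) = true) m
def pvGC (m : ℕ) : ℕ := Nat.count (fun j => pvGoodN j = true) (m + 1)

lemma pvTdc_eq (f : ℕ) : ∀ (n : ℕ) (acc : List Char), n < f →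
    Nat.toDigitsCore 10 f n acc = pvDigs n ++ acc := by
  induction f with
  | zero => omega
  | succ f ih =>
    intro n acc hn
    rw [Nat.toDigitsCore]
    by_cases h : n / 10 = 0
    · rw [pvDigs, dif_pos h]
      simp [h]
    · rw [pvDigs, dif_neg h]
      have hlt : n / 10 < f := by omega
      simp only [h, if_neg h]
      rw [ih (n / 10) _ hlt]
      simp

lemma pvToDigits_eq (n : ℕ) : Nat.toDigits 10 n = pvDigs n := by
  rw [Nat.toDigits, pvTdc_eq (n + 1) n [] (by omega)]
  simp

lemma pvDigitChar3 (k : ℕ) (hk : k < 10) : (Nat.digitChar k = '3') ↔ k = 3 := by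
  interval_cases k <;> decide

lemma pvMem_digs (n : ℕ) : ('3' ∈ pvDigs n) ↔ pvHas3 n = true := by
  induction n using Nat.strong_induction_on with
  | _ n ih =>
    rw [pvDigs]
    have hd : ('3' = Nat.digitChar (n % 10)) ↔ n % 10 = 3 := by
      rw [eq_comm]
      exact pvDigitChar3 (n % 10) (by omega)
    by_cases h : n / 10 = 0
    · rw [dif_pos h]
      have h9 : pvHas3 n = decide (n % 10 = 3) := by
        rw [pvHas3]
        by_cases h0 : n = 0
        · subst h0; simp
        · rw [dif_neg h0, h]
          have h00 : pvHas3 0 = false := by rw [pvHas3]; simp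
          simp [h00]
      rw [h9]
      simp only [List.mem_singleton, hd, decide_eq_true_eq]
    · rw [dif_neg h]
      have hlt : n / 10 < n := by omega
      rw [pvHas3, dif_neg (by omega : ¬ n = 0)]
      simp only [List.mem_append, List.mem_singleton, ih (n / 10) hlt, hd,
        Bool.or_eq_true, decide_eq_true_eq]
      tauto

lemma pvIsIn3 (m : ℕ) : PySem.Str.isIn "3" (PySem.Int.toStr (m : ℤ)) = pvHas3 m := by
  have hl : (PySem.Int.toStr (m : ℤ)).toList = pvDigs m := by
    rw [PySem.Int.toList_toStr]
    simp [PySem.Int.toChars, pvToDigits_eq]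
  cases h : pvHas3 m
  · rw [← Bool.not_eq_true]
    rw [PySem.Str.isIn_iff_infix, hl]
    intro hc
    have : ('3' : Char) ∈ pvDigs m := by
      have : ("3".toList) = ['3'] := rfl
      rw [this] at hc
      exact (List.singleton_infix_iff _ _).1 hc
    rw [pvMem_digs] at this
    simp [h] at this
  · rw [PySem.Str.isIn_iff_infix, hl]
    have : ('3' : Char) ∈ pvDigs m := (pvMem_digs m).2 h
    exact (List.singleton_infix_iff _ _).2 this

lemma pvSolGoodb_natCast (m : ℕ) : solGoodb (m : ℤ) = pvGoodN m := by
  unfold solGoodb pvGoodN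
  rw [pvIsIn3]
  have hm : PySem.Int.mod (m : ℤ) 3 = ((m % 3 : ℕ) : ℤ) := by
    rw [PySem.Int.mod_eq_emod_of_pos (by norm_num)]
    push_cast
    ring
  rw [hm, Bool.and_comm]
  congr 1
  rw [decide_eq_decide]
  omega

lemma pvHas3_decomp (q b : ℕ) (hb : b < 10) :
    pvHas3 (10 * q + b) = (decide (b = 3) || pvHas3 q) := by
  by_cases h0 : 10 * q + b = 0
  · have hq : q = 0 := by omega
    have hb0 : b = 0 := by omega
    subst hq; subst hb0
    rw [pvHas3]; simp
  · rw [pvHas3, dif_neg h0]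
    have h1 : (10 * q + b) % 10 = b := by omega
    have h2 : (10 * q + b) / 10 = q := by omega
    rw [h1, h2]

lemma pvHas3_pow (e : ℕ) : pvHas3 (10 ^ e) = false := by
  induction e with
  | zero =>
    show pvHas3 1 = false
    rw [pvHas3]; simp [pvHas3]
  | succ e ih =>
    have : 10 ^ (e + 1) = 10 * 10 ^ e + 0 := by ring
    rw [this, pvHas3_decomp _ _ (by omega)]
    simp [ih]

lemma pvPow10_mod3 (e : ℕ) : 10 ^ e % 3 = 1 := by
  induction e with
  | zero => rfl
  | succ e ih =>
    have : 10 ^ (e + 1) = 10 * 10 ^ e := by ring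
    rw [this]
    omega

lemma pvGoodN_pow (e : ℕ) : pvGoodN (10 ^ e) = true := by
  unfold pvGoodN
  rw [pvHas3_pow]
  have := pvPow10_mod3 e
  simp
  omega

lemma pvMod3_cases (m : ℕ) : m % 3 = 0 ∨ m % 3 = 1 ∨ m % 3 = 2 := by omega

lemma pvResb_high (t m : ℕ) (h : pvHas3 m = true) : pvResb t m = false := by
  simp [pvResb, h]

lemma pvResb_low (t m : ℕ) (h : pvHas3 m = false) : pvResb t m = decide (m % 3 = t) := by
  simp [pvResb, h]

lemma pvTF_split (m : ℕ) : pvNC 0 m + pvNC 1 m + pvNC 2 m = pvTF m := by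
  induction m with
  | zero => simp [pvNC, pvTF]
  | succ m ih =>
    have e0 : pvNC 0 (m + 1) = pvNC 0 m + (if pvResb 0 m = true then 1 else 0) := Nat.count_succ _ _
    have e1 : pvNC 1 (m + 1) = pvNC 1 m + (if pvResb 1 m = true then 1 else 0) := Nat.count_succ _ _
    have e2 : pvNC 2 (m + 1) = pvNC 2 m + (if pvResb 2 m = true then 1 else 0) := Nat.count_succ _ _
    have et : pvTF (m + 1) = pvTF m + (if (!pvHas3 m) = true then 1 else 0) := Nat.count_succ _ _
    rw [e0, e1, e2, et]
    cases h : pvHas3 m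
    · rw [pvResb_low 0 m h, pvResb_low 1 m h, pvResb_low 2 m h]
      rcases pvMod3_cases m with h3 | h3 | h3 <;> simp [h3] <;> omega
    · rw [pvResb_high 0 m h, pvResb_high 1 m h, pvResb_high 2 m h]
      simp
      omega

lemma pvChunk (t q : ℕ) (ht : t < 3) :
    Nat.count (fun k => pvResb t (10 * q + k) = true) 10
      = if pvHas3 q = true then 0 else 3 := by
  have hcg : ∀ k ∈ Finset.range 10, (pvResb t (10 * q + k) = true)
      ↔ ((!(decide (k = 3) || pvHas3 q) && decide ((q % 3 + k) % 3 = t)) = true) := by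
    intro k hk
    simp only [Finset.mem_range] at hk
    unfold pvResb
    rw [pvHas3_decomp q k hk]
    have h2 : ((10 * q + k) % 3 = t) ↔ ((q % 3 + k) % 3 = t) := by omega
    rw [decide_eq_decide.2 h2]
  rw [Nat.count_eq_card_filter_range, Finset.filter_congr hcg]
  cases hq : pvHas3 q
  · rcases pvMod3_cases q with h3 | h3 | h3 <;>
      simp only [h3] <;>
      (rcases (by omega : t = 0 ∨ t = 1 ∨ t = 2) with ht' | ht' | ht' <;> subst ht' <;> decide)
  · simp

lemma pvNC_mul10 (t q : ℕ) (ht : t < 3) : pvNC t (10 * q) = 3 * pvTF q := by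
  induction q with
  | zero => simp [pvNC, pvTF]
  | succ q ih =>
    have h1 : 10 * (q + 1) = 10 * q + 10 := by ring
    rw [h1]
    unfold pvNC at *
    rw [Nat.count_add, ih]
    have hc : Nat.count (fun k => pvResb t (10 * q + k) = true) 10
        = if pvHas3 q = true then 0 else 3 := pvChunk t q ht
    have hb : Nat.count (fun k => (fun j => pvResb t j = true) (10 * q + k)) 10
        = if pvHas3 q = true then 0 else 3 := hc
    rw [hb]
    unfold pvTF
    rw [Nat.count_succ]
    cases h : pvHas3 q <;> simp [h] <;> ring

lemma pvGoodCount (M : ℕ) :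
    Nat.count (fun j => pvGoodN j = true) M = pvNC 1 M + pvNC 2 M := by
  induction M with
  | zero => simp [pvNC]
  | succ M ih =>
    have e1 : pvNC 1 (M + 1) = pvNC 1 M + (if pvResb 1 M = true then 1 else 0) := Nat.count_succ _ _
    have e2 : pvNC 2 (M + 1) = pvNC 2 M + (if pvResb 2 M = true then 1 else 0) := Nat.count_succ _ _
    have eg : Nat.count (fun j => pvGoodN j = true) (M + 1)
        = Nat.count (fun j => pvGoodN j = true) M + (if pvGoodN M = true then 1 else 0) :=
      Nat.count_succ _ _
    rw [e1, e2, eg, ih]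
    cases h : pvHas3 M
    · rw [pvResb_low 1 M h, pvResb_low 2 M h]
      rcases pvMod3_cases M with h3 | h3 | h3 <;> simp [pvGoodN, h, h3] <;> omega
    · rw [pvResb_high 1 M h, pvResb_high 2 M h]
      simp [pvGoodN, h]

lemma pvGC_eq (m : ℕ) : pvGC m = pvNC 1 (m + 1) + pvNC 2 (m + 1) := pvGoodCount (m + 1)

def pvBC (t qn r : ℕ) : ℤ :=
  (Nat.count (fun k => (decide (k ≠ 3) && decide ((qn + k) % 3 = t)) = true) r : ℤ)

lemma pvFoldRange (qn : ℕ) (r : ℕ) (x y z : ℤ) :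
    (PySem.List.pyRange 0 (r : ℤ)).foldl (fun (c : Int × Int × Int) b =>
        if b ≠ 3 then
          let t := PySem.Int.mod ((qn : ℤ) + b) 3
          if t = 0 then (c.1 + 1, c.2.1, c.2.2)
          else if t = 1 then (c.1, c.2.1 + 1, c.2.2)
          else (c.1, c.2.1, c.2.2 + 1)
        else c) (x, y, z)
      = (x + pvBC 0 qn r, y + pvBC 1 qn r, z + pvBC 2 qn r) := by
  induction r with
  | zero =>
    have h := PySem.List.pyRange_zero_natCast 0
    simp only [Nat.cast_zero] at h
    simp [h, pvBC]
  | succ r ih =>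
    rw [PySem.List.pyRange_zero_natCast, List.range_succ, List.map_append, List.foldl_append,
        ← PySem.List.pyRange_zero_natCast, ih]
    simp only [List.map_cons, List.map_nil, List.foldl_cons, List.foldl_nil]
    have hmod : PySem.Int.mod ((qn : ℤ) + (r : ℤ)) 3 = (((qn + r) % 3 : ℕ) : ℤ) := by
      have : ((qn : ℤ) + (r : ℤ)) = ((qn + r : ℕ) : ℤ) := by push_cast; ring
      rw [this, PySem.Int.mod_eq_emod_of_pos (by norm_num)]
      push_cast; ring
    have hbc : ∀ t, pvBC t qn (r + 1)
        = pvBC t qn r + (if (r ≠ 3 ∧ (qn + r) % 3 = t) then 1 else 0) := by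
      intro t
      unfold pvBC
      rw [Nat.count_succ]
      push_cast
      congr 1
      by_cases h1 : r ≠ 3 <;> by_cases h2 : (qn + r) % 3 = t <;> simp [h1, h2]
    by_cases hr3 : (r : ℤ) ≠ 3
    · have hr3' : r ≠ 3 := by omega
      rw [if_pos hr3]
      simp only [hmod]
      rcases pvMod3_cases (qn + r) with h3 | h3 | h3 <;>
        simp [h3, hbc, hr3', Prod.ext_iff] <;> ring
    · have hr3' : r = 3 := by omega
      subst hr3'
      rw [if_neg hr3]
      simp only [hbc]
      norm_num

lemma pvCount_congr (f g : ℕ → Bool) (M : ℕ) (h : ∀ k, k < M → f k = g k) :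
    Nat.count (fun k => f k = true) M = Nat.count (fun k => g k = true) M := by
  induction M with
  | zero => simp
  | succ M ih =>
    rw [Nat.count_succ, Nat.count_succ, ih (fun k hk => h k (by omega)), h M (by omega)]

lemma pvCnt3_natCast (m : ℕ) :
    pvCnt3 (m : ℤ) = ((pvNC 0 m : ℤ), (pvNC 1 m : ℤ), (pvNC 2 m : ℤ), pvHas3 m) := by
  induction m using Nat.strong_induction_on with
  | _ m ih =>
    by_cases h0 : m = 0
    · subst h0
      rw [pvCnt3]
      have : pvHas3 0 = false := by rw [pvHas3]; simp
      simp [pvNC, this]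
    · rw [pvCnt3, if_neg (by omega : ¬ (m : ℤ) ≤ 0)]
      have hq : PySem.Int.floordiv (m : ℤ) 10 = ((m / 10 : ℕ) : ℤ) := by
        rw [PySem.Int.floordiv_eq_ediv_of_pos (by norm_num)]
        push_cast; ring
      have hr : PySem.Int.mod (m : ℤ) 10 = ((m % 10 : ℕ) : ℤ) := by
        rw [PySem.Int.mod_eq_emod_of_pos (by norm_num)]
        push_cast; ring
      dsimp only
      rw [hq, hr, ih (m / 10) (by omega)]
      dsimp only
      have hm10 : m = 10 * (m / 10) + m % 10 := by omega
      have hsum : (3 : ℤ) * ((pvNC 0 (m / 10) : ℤ) + (pvNC 1 (m / 10) : ℤ) + (pvNC 2 (m / 10) : ℤ))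
          = 3 * (pvTF (m / 10) : ℤ) := by
        have := pvTF_split (m / 10)
        push_cast
        omega
      -- the t-component of the result equals pvNC t m, in each case of pvHas3 (m/10)
      have hNCsplit : ∀ t, t < 3 → pvNC t m = 3 * pvTF (m / 10)
            + Nat.count (fun k => pvResb t (10 * (m / 10) + k) = true) (m % 10) := by
        intro t ht
        conv_lhs => rw [hm10]
        unfold pvNC
        rw [Nat.count_add]
        have hmul := pvNC_mul10 t (m / 10) ht
        unfold pvNC at hmul
        omega
      have hhas : pvHas3 m = (decide (m % 10 = 3) || pvHas3 (m / 10)) := by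
        conv_lhs => rw [hm10]
        exact pvHas3_decomp (m / 10) (m % 10) (by omega)
      have hdec : decide ((((m % 10 : ℕ)) : ℤ) = 3) = decide (m % 10 = 3) := by
        rw [decide_eq_decide]
        omega
      cases hh : pvHas3 (m / 10)
      · simp only [Bool.not_false, if_pos]
        rw [pvFoldRange (m / 10) (m % 10)]
        have hbc : ∀ t, t < 3 → pvBC t (m / 10) (m % 10)
            = (Nat.count (fun k => pvResb t (10 * (m / 10) + k) = true) (m % 10) : ℤ) := by
          intro t ht
          unfold pvBC
          congr 1
          apply pvCount_congr
          intro k hk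
          have hk10 : k < 10 := by omega
          unfold pvResb
          rw [pvHas3_decomp (m / 10) k hk10, hh]
          have h2n : (10 * (m / 10) + k) % 3 = (m / 10 + k) % 3 := by omega
          rw [h2n]
          simp [decide_not]
        simp only [Prod.fst, Prod.snd]
        refine Prod.ext ?_ (Prod.ext ?_ (Prod.ext ?_ ?_)) <;> simp only []
        · rw [hsum, hbc 0 (by omega), hNCsplit 0 (by omega)]; push_cast; ring
        · rw [hsum, hbc 1 (by omega), hNCsplit 1 (by omega)]; push_cast; ring
        · rw [hsum, hbc 2 (by omega), hNCsplit 2 (by omega)]; push_cast; ring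
        · rw [hhas, hh, hdec]
          simp [Bool.or_comm]
      · simp only [Bool.not_true, Bool.false_eq_true, if_neg (by simp : ¬ (false = true))]
        have hzero : ∀ t, t < 3 →
            Nat.count (fun k => pvResb t (10 * (m / 10) + k) = true) (m % 10) = 0 := by
          intro t ht
          have : Nat.count (fun k => pvResb t (10 * (m / 10) + k) = true) (m % 10)
              = Nat.count (fun k => (false : Bool) = true) (m % 10) := by
            apply pvCount_congr
            intro k hk
            unfold pvResb
            rw [pvHas3_decomp (m / 10) k (by omega), hh]
            simp
          rw [this]
          induction (m % 10) with
          | zero => simp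
          | succ j ihj => rw [Nat.count_succ]; simp [ihj]
        refine Prod.ext ?_ (Prod.ext ?_ (Prod.ext ?_ ?_)) <;> simp only []
        · rw [hsum, hNCsplit 0 (by omega), hzero 0 (by omega)]; push_cast; ring
        · rw [hsum, hNCsplit 1 (by omega), hzero 1 (by omega)]; push_cast; ring
        · rw [hsum, hNCsplit 2 (by omega), hzero 2 (by omega)]; push_cast; ring
        · rw [hhas, hh, hdec]
          simp [Bool.or_comm]

lemma pvICount_natCast (m : ℕ) : pvICount (m : ℤ) = (pvGC m : ℤ) := by
  unfold pvICount
  have h1 : (m : ℤ) + 1 = ((m + 1 : ℕ) : ℤ) := by push_cast; ring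
  rw [h1, pvCnt3_natCast, pvGC_eq]
  push_cast
  ring

lemma pvGC_pow_ge (e : ℕ) : e ≤ pvGC (10 ^ e) := by
  induction e with
  | zero => omega
  | succ e ih =>
    have hstep : pvGC (10 ^ e) + 1 ≤ pvGC (10 ^ (e + 1)) := by
      unfold pvGC
      have h1 : Nat.count (fun j => pvGoodN j = true) (10 ^ (e + 1) + 1)
          = Nat.count (fun j => pvGoodN j = true) (10 ^ (e + 1)) + 1 := by
        rw [Nat.count_succ, if_pos (pvGoodN_pow (e + 1))]
      rw [h1]
      have h2 : 10 ^ e + 1 ≤ 10 ^ (e + 1) := by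
        have : 1 ≤ 10 ^ e := Nat.one_le_pow _ _ (by norm_num)
        calc 10 ^ e + 1 ≤ 10 ^ e * 10 := by omega
        _ = 10 ^ (e + 1) := by ring
      have := Nat.count_monotone (fun j => pvGoodN j = true) h2
      omega
    omega

lemma pvGood_infinite : (setOf fun m => pvGoodN m = true).Infinite := by
  apply Set.infinite_of_forall_exists_gt
  intro a
  refine ⟨10 ^ (a + 1), pvGoodN_pow (a + 1), ?_⟩
  calc a < 10 ^ a := Nat.lt_pow_self (by norm_num)
  _ ≤ 10 ^ (a + 1) := Nat.pow_le_pow_right (by norm_num) (by omega)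

lemma pvCount_nth (i : ℕ) :
    Nat.count (fun m => pvGoodN m = true) (Nat.nth (fun m => pvGoodN m = true) i) = i :=
  Nat.count_nth_of_infinite pvGood_infinite i

lemma pvNth_good (i : ℕ) : pvGoodN (Nat.nth (fun m => pvGoodN m = true) i) = true :=
  Nat.nth_mem_of_infinite pvGood_infinite i

lemma pvPyGetLast (a : List Int) (x : Int) : PySem.List.pyGet? (a ++ [x]) (-1) = some x := by
  simp [PySem.List.pyGet?, PySem.List.pyIdx?]

lemma pvLoopA_stop (fuel : ℕ) (n answer k : Int) (a : List Int) (h : ¬ k < n) :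
    solLoopA fuel n answer k a = a := by
  cases fuel <;> simp [solLoopA, h]

lemma pvLoopA_inv (n : Int) (hn : 1 ≤ n) (N : ℕ)
    (hN : N = Nat.nth (fun m => pvGoodN m = true) (n.toNat - 1)) :
    ∀ (fuel : ℕ) (m : ℕ) (a : List Int),
      Nat.count (fun j => pvGoodN j = true) m < n.toNat →
      N + 2 ≤ m + fuel →
      PySem.List.pyGet? (solLoopA fuel n (m : ℤ) ((Nat.count (fun j => pvGoodN j = true) m : ℕ) : ℤ) a) (-1)
        = some (N : ℤ) := by
  have hcN : Nat.count (fun j => pvGoodN j = true) N = n.toNat - 1 := by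
    rw [hN]; exact pvCount_nth _
  have hgN : pvGoodN N = true := by rw [hN]; exact pvNth_good _
  intro fuel
  induction fuel with
  | zero =>
    intro m a hcount hfuel
    exfalso
    have h1 : N + 1 ≤ m := by omega
    have h2 := Nat.count_monotone (fun j => pvGoodN j = true) h1
    rw [Nat.count_succ, if_pos hgN, hcN] at h2
    omega
  | succ fuel ih =>
    intro m a hcount hfuel
    have hk : ((Nat.count (fun j => pvGoodN j = true) m : ℕ) : ℤ) < n := by
      omega
    rw [solLoopA, if_pos hk]
    have hgb : solGoodb (m : ℤ) = pvGoodN m := pvSolGoodb_natCast m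
    cases hg : pvGoodN m
    · rw [hgb, hg]
      simp only [Bool.false_eq_true, if_neg (by simp : ¬ (false = true))]
      have hc1 : Nat.count (fun j => pvGoodN j = true) (m + 1)
          = Nat.count (fun j => pvGoodN j = true) m := by
        rw [Nat.count_succ, if_neg (by simp [hg])]
        omega
      have := ih (m + 1) a (by omega) (by omega)
      rw [hc1] at this
      have hcast : ((m : ℤ) + 1) = ((m + 1 : ℕ) : ℤ) := by push_cast; ring
      rw [hcast]
      exact this
    · rw [hgb, hg, if_pos rfl]
      have hc1 : Nat.count (fun j => pvGoodN j = true) (m + 1)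
          = Nat.count (fun j => pvGoodN j = true) m + 1 := by
        rw [Nat.count_succ, if_pos hg]
      by_cases hlt : Nat.count (fun j => pvGoodN j = true) (m + 1) < n.toNat
      · have := ih (m + 1) (a ++ [(m : ℤ)]) hlt (by omega)
        have hcast : ((m : ℤ) + 1) = ((m + 1 : ℕ) : ℤ) := by push_cast; ring
        have hcast2 : (((Nat.count (fun j => pvGoodN j = true) m : ℕ) : ℤ) + 1)
            = ((Nat.count (fun j => pvGoodN j = true) (m + 1) : ℕ) : ℤ) := by
          rw [hc1]; push_cast; ring
        rw [hcast, hcast2]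
        exact this
      · -- the count just reached n: the next unfolding stops and the last element is m = N
        have hstop : ¬ (((Nat.count (fun j => pvGoodN j = true) m : ℕ) : ℤ) + 1) < n := by
          omega
        have hcast : ((m : ℤ) + 1) = ((m + 1 : ℕ) : ℤ) := by push_cast; ring
        rw [pvLoopA_stop fuel n ((m : ℤ) + 1) _ _ hstop, pvPyGetLast]
        have hmN : m = N := by
          have hcm : Nat.count (fun j => pvGoodN j = true) m = n.toNat - 1 := by omega
          have := Nat.nth_count (p := fun j => pvGoodN j = true) hg
          rw [hcm] at this
          rw [hN, ← this]
        rw [hmN]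

lemma pvSolutionA_eq (n : Int) (hn : 1 ≤ n) :
    solution n = (Nat.nth (fun m => pvGoodN m = true) (n.toNat - 1) : ℤ) := by
  set N := Nat.nth (fun m => pvGoodN m = true) (n.toNat - 1) with hN
  have hNle : N ≤ 10 ^ n.toNat := by
    by_contra hcon
    have h1 : 10 ^ n.toNat + 1 ≤ N := by omega
    have h2 := Nat.count_monotone (fun j => pvGoodN j = true) h1
    have h3 : Nat.count (fun j => pvGoodN j = true) N = n.toNat - 1 := pvCount_nth _
    have h4 : n.toNat ≤ pvGC (10 ^ n.toNat) := pvGC_pow_ge n.toNat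
    unfold pvGC at h4
    omega
  unfold solution
  have h0 : Nat.count (fun j => pvGoodN j = true) 0 = 0 := Nat.count_zero _
  have := pvLoopA_inv n hn N hN (10 ^ n.toNat + 2) 0 [] (by omega) (by omega)
  rw [h0] at this
  simp only [Nat.cast_zero] at this
  rw [this]
  rfl

lemma pvGrowHi_post (n : Int) (hn : 1 ≤ n) :
    ∀ (fuel e : ℕ), n.toNat ≤ e + fuel →
      ∃ e' : ℕ, pvGrowHi fuel n ((10 : ℤ) ^ e) = (10 : ℤ) ^ e' ∧
        n ≤ pvICount ((10 : ℤ) ^ e') := by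
  intro fuel
  induction fuel with
  | zero =>
    intro e he
    refine ⟨e, rfl, ?_⟩
    have hcast : ((10 : ℤ) ^ e) = ((10 ^ e : ℕ) : ℤ) := by push_cast; ring
    rw [hcast, pvICount_natCast]
    have h1 := pvGC_pow_ge e
    omega
  | succ fuel ih =>
    intro e he
    rw [pvGrowHi]
    by_cases h : pvICount ((10 : ℤ) ^ e) < n
    · rw [if_pos h]
      have hpow : (10 : ℤ) * (10 : ℤ) ^ e = (10 : ℤ) ^ (e + 1) := by ring
      rw [hpow]
      exact ih (e + 1) (by omega)
    · rw [if_neg h]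
      exact ⟨e, rfl, by omega⟩

lemma pvBinSearch_inv (n : Int) (hn : 1 ≤ n) :
    ∀ (lo hi : Int), 1 ≤ lo → lo ≤ hi →
      pvICount (lo - 1) < n → n ≤ pvICount hi →
      pvBinSearch n lo hi = (Nat.nth (fun m => pvGoodN m = true) (n.toNat - 1) : ℤ) := by
  intro lo hi
  induction lo, hi using pvBinSearch.induct n with
  | case1 lo hi hlt mid hmid ih =>
    intro h1 h2 h3 h4
    have hb := PySem.Int.floordiv_two_mid_bounds (le_of_lt hlt)
    have hmlt : PySem.Int.floordiv (lo + hi) 2 < hi :=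
      (PySem.Int.floordiv_lt_iff_lt_mul (by norm_num)).2 (by omega)
    rw [pvBinSearch, dif_pos hlt]
    dsimp only
    rw [if_pos hmid]
    apply ih
    · omega
    · omega
    · have : mid + 1 - 1 = mid := by ring
      rw [this]; exact hmid
    · exact h4
  | case2 lo hi hlt mid hmid ih =>
    intro h1 h2 h3 h4
    have hb := PySem.Int.floordiv_two_mid_bounds (le_of_lt hlt)
    rw [pvBinSearch, dif_pos hlt]
    dsimp only
    rw [if_neg hmid]
    apply ih
    · omega
    · omega
    · exact h3
    · omega
  | case3 lo hi hnlt =>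
    intro h1 h2 h3 h4
    rw [pvBinSearch, dif_neg hnlt]
    have hlohi : lo = hi := by omega
    subst hlohi
    have hm : lo = ((lo.toNat : ℕ) : ℤ) := by omega
    set m := lo.toNat with hmdef
    have hm1 : 1 ≤ m := by omega
    have hcast1 : lo - 1 = ((m - 1 : ℕ) : ℤ) := by omega
    rw [hcast1, pvICount_natCast] at h3
    rw [hm, pvICount_natCast] at h4
    have hGC1 : pvGC (m - 1) < n.toNat := by omega
    have hGC2 : n.toNat ≤ pvGC m := by omega
    unfold pvGC at hGC1 hGC2
    have hc1 : m - 1 + 1 = m := by omega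
    rw [hc1] at hGC1
    have hsucc : Nat.count (fun j => pvGoodN j = true) (m + 1)
        = Nat.count (fun j => pvGoodN j = true) m
          + (if pvGoodN m = true then 1 else 0) := by
      rw [Nat.count_succ]
    have hgood : pvGoodN m = true := by
      by_contra hng
      rw [hsucc, if_neg hng] at hGC2
      omega
    have hcm : Nat.count (fun j => pvGoodN j = true) m = n.toNat - 1 := by
      rw [hsucc, if_pos hgood] at hGC2
      omega
    have := Nat.nth_count (p := fun j => pvGoodN j = true) hgood
    rw [hcm] at this
    rw [this, ← hm]

lemma pvSolutionB_eq (n : Int) (hn : 1 ≤ n) :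
    solution_alt n = (Nat.nth (fun m => pvGoodN m = true) (n.toNat - 1) : ℤ) := by
  unfold solution_alt
  obtain ⟨e', heq, hge⟩ := pvGrowHi_post n hn (n.toNat + 2) 1 (by omega)
  have h10 : (10 : ℤ) ^ (1 : ℕ) = 10 := by ring
  rw [h10] at heq
  rw [heq]
  have hic0 : pvICount (1 - 1) < n := by
    have hz : ((1 : ℤ) - 1) = ((0 : ℕ) : ℤ) := by norm_num
    rw [hz, pvICount_natCast]
    have hg0 : pvGC 0 = 0 := by
      unfold pvGC
      rw [Nat.count_succ, Nat.count_zero]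
      have : pvGoodN 0 = false := by unfold pvGoodN; simp
      simp [this]
    omega
  exact pvBinSearch_inv n hn 1 ((10 : ℤ) ^ e') (by norm_num)
    (one_le_pow₀ (by norm_num)) hic0 hge

-- ===== VERDICT (by name: the statement is the Claim_ definition above) =====
theorem solution_spec : Claim_equal_solution := by
  intro n _ hpre
  unfold Spec_solution
  rw [pvSolutionA_eq n hpre, pvSolutionB_eq n hpre]
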